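-- pv_equiv track=rewrite | github.com/jaminmc/sub2trans | sub2trans.py | _parse_vtt_content
-- ===== SOURCE A (Python) =====
-- from typing import List, Dict, Tuple, Optional
--
-- def _parse_vtt_content(content: str) -> List[str]:
--     """Parse VTT content into subtitle blocks"""
--     lines = content.strip().split('\n')
--     blocks = []
--     current_block = []
--
--     for line in lines:
--         line = line.strip()
--
--         # Skip WEBVTT header and empty lines
--         if line == 'WEBVTT' or line == '':
--             continue
--
--         # Skip style and note blocks
--         if line.startswith('NOTE') or line.startswith('STYLE'):
--             continue
--
--         # Check if this is a timestamp line (contains -->)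
--         if ' --> ' in line:
--             # If we have a current block, save it
--             if current_block:
--                 blocks.append('\n'.join(current_block))
--                 current_block = []
--             # Start new block with timestamp
--             current_block = [line]
--         else:
--             # This is text content
--             if current_block:  # Only add if we're in a block
--                 current_block.append(line)
--
--     # Add the last block if it exists
--     if current_block:
--         blocks.append('\n'.join(current_block))
--
--     return blocks
-- ===== SOURCE B (Python) =====
-- def _parse_vtt_content(content: str) -> list:
--     """Parse VTT content into subtitle blocks (single reversed pass, blocks built back-to-front)."""
--     lines = [s for raw in content.strip().split('\n')
--              if (s := raw.strip()) != '' and s != 'WEBVTT'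
--              and not s.startswith('NOTE') and not s.startswith('STYLE')]
--     blocks = []
--     tail = []  # text lines collected below the next timestamp, in reversed order
--     for line in reversed(lines):
--         if ' --> ' in line:
--             blocks.append('\n'.join([line] + tail[::-1]))
--             tail = []
--         else:
--             tail.append(line)
--     # lines above the first timestamp (left in `tail`) belong to no block
--     blocks.reverse()
--     return blocks
-- ===== Notes on version B (the rewrite author's own statement) =====
-- stated objective: alternative
-- what changed: A interleaves filtering with stateful forward block-building (current_block accumulator flushed at each timestamp); B first builds the filtered list of cleaned lines, then makes a single reversed pass that emits each block back-to-front when its timestamp line is reached, discarding the leftover lines above the first timestamp.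
import Mathlib
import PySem

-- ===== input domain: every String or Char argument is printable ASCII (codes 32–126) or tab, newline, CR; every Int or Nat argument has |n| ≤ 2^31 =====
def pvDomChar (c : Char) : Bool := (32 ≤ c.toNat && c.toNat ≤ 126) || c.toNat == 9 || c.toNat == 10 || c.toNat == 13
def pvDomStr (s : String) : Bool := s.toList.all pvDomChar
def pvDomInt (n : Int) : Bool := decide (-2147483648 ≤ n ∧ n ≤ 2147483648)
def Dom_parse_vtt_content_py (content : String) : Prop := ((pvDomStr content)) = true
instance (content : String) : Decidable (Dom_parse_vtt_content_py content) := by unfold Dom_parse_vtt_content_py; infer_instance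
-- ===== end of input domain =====

-- B replaces A's forward accumulator loop with a filtered-lines list and a single
-- reversed pass that emits each block back-to-front at its timestamp line (objective: alternative).

-- ===== PORT A =====
-- one iteration of A's `for line in lines` loop; state = (blocks, current_block)
def pvStepA (st : List String × List String) (raw : String) : List String × List String :=
  let line := PySem.Str.strip raw
  if line == "WEBVTT" || line == "" then st
  else if PySem.Str.startswith line "NOTE" || PySem.Str.startswith line "STYLE" then st
  else if PySem.Str.isIn " --> " line then
    let blocks := if st.2 ≠ [] then st.1 ++ [PySem.Str.join "\n" st.2] else st.1
    (blocks, [line])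
  else if st.2 ≠ [] then (st.1, st.2 ++ [line]) else st

def parse_vtt_content_py (content : String) : List String :=
  let lines := (PySem.Str.split? (PySem.Str.strip content) "\n").getD []
  let st := lines.foldl pvStepA ([], [])
  if st.2 ≠ [] then st.1 ++ [PySem.Str.join "\n" st.2] else st.1

-- ===== PORT B =====
def pvKeep (s : String) : Bool :=
  s != "" && s != "WEBVTT" && !PySem.Str.startswith s "NOTE" && !PySem.Str.startswith s "STYLE"

-- one iteration of B's `for line in reversed(lines)` loop; state = (blocks, tail)
def pvStepB (st : List String × List String) (line : String) : List String × List String :=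
  if PySem.Str.isIn " --> " line then
    (st.1 ++ [PySem.Str.join "\n" (line :: st.2.reverse)], [])
  else (st.1, st.2 ++ [line])

def parse_vtt_content_py_alt (content : String) : List String :=
  let lines := (((PySem.Str.split? (PySem.Str.strip content) "\n").getD []).map PySem.Str.strip).filter pvKeep
  let st := lines.reverse.foldl pvStepB ([], [])
  st.1.reverse

-- ===== PRECONDITION & SPEC =====
def Spec_parse_vtt_content_py (content : String) (out : List String) : Prop := out = parse_vtt_content_py_alt content
instance (content : String) (out : List String) : Decidable (Spec_parse_vtt_content_py content out) := by unfold Spec_parse_vtt_content_py; infer_instance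

-- ===== CLAIM (what is proved, stated in full; the proofs are below) =====
def Claim_equal_parse_vtt_content_py : Prop := ∀ (content : String), Dom_parse_vtt_content_py content → Spec_parse_vtt_content_py content (parse_vtt_content_py content)

-- ===== LEMMAS AND PROOFS =====

-- A's loop body on an already-kept, already-stripped line (the skip branches removed)
def pvStepA' (st : List String × List String) (l : String) : List String × List String :=
  if PySem.Str.isIn " --> " l then
    ((if st.2 ≠ [] then st.1 ++ [PySem.Str.join "\n" st.2] else st.1), [l])
  else if st.2 ≠ [] then (st.1, st.2 ++ [l]) else st

-- A's loop body equals: strip, then (if kept) the skip-free body, else skip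
theorem pvStepA_eq (st : List String × List String) (l : String) :
    pvStepA st l = if pvKeep (PySem.Str.strip l) then pvStepA' st (PySem.Str.strip l) else st := by
  unfold pvStepA pvStepA' pvKeep
  cases h1 : (PySem.Str.strip l == "") <;>
  cases h2 : (PySem.Str.strip l == "WEBVTT") <;>
  cases h3 : PySem.Str.startswith (PySem.Str.strip l) "NOTE" <;>
  cases h4 : PySem.Str.startswith (PySem.Str.strip l) "STYLE" <;>
    simp only [h1, h2, h3, h4, bne, Bool.or_true, Bool.or_false, Bool.not_true,
      Bool.not_false, Bool.and_true, Bool.and_false, Bool.false_eq_true, if_true, if_false]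

-- A's loop over the raw lines equals the skip-free loop over B's filtered line list
theorem pvFoldA_filter (ls : List String) (st : List String × List String) :
    ls.foldl pvStepA st = ((ls.map PySem.Str.strip).filter pvKeep).foldl pvStepA' st := by
  induction ls generalizing st with
  | nil => rfl
  | cons l ls ih =>
    rw [List.foldl_cons, pvStepA_eq]
    by_cases hk : pvKeep (PySem.Str.strip l) = true
    · simp only [List.map_cons, List.filter_cons, hk, if_pos, List.foldl_cons, ih]
    · simp only [List.map_cons, List.filter_cons, hk, Bool.false_eq_true, if_false, ih]

-- B's reversed fold, written as a foldr so that it recurses on the FRONT of the list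
def pvF (ls : List String) : List String × List String :=
  ls.foldr (fun l st => pvStepB st l) ([], [])

theorem pvF_eq (ls : List String) : ls.reverse.foldl pvStepB ([], []) = pvF ls := by
  simp [pvF, List.foldl_reverse]

theorem pvF_cons (l : String) (ls : List String) : pvF (l :: ls) = pvStepB (pvF ls) l := rfl

-- the tail component of pvF is the reversed leading run of non-timestamp lines
theorem pvF_snd (ls : List String) :
    (pvF ls).2 = (ls.takeWhile (fun l => !PySem.Str.isIn " --> " l)).reverse := by
  induction ls with
  | nil => rfl
  | cons l ls ih =>
    rw [pvF_cons, List.takeWhile_cons]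
    unfold pvStepB
    cases h : PySem.Str.isIn " --> " l
    · rw [ih]
      simp
    · simp

-- pvF on a list beginning with a timestamp line: the block is emitted at the back
theorem pvF_fst_ts (l : String) (ls : List String) (ht : PySem.Str.isIn " --> " l = true) :
    (pvF (l :: ls)).1.reverse
      = PySem.Str.join "\n" (l :: ls.takeWhile (fun x => !PySem.Str.isIn " --> " x))
        :: (pvF ls).1.reverse := by
  rw [pvF_cons]
  unfold pvStepB
  rw [if_pos ht]
  simp only [List.reverse_append, List.reverse_cons, List.reverse_nil, List.nil_append,
    List.cons_append, pvF_snd, List.reverse_reverse]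

theorem pvF_fst_text (l : String) (ls : List String) (ht : PySem.Str.isIn " --> " l = false) :
    (pvF (l :: ls)).1 = (pvF ls).1 := by
  rw [pvF_cons]
  unfold pvStepB
  rw [if_neg (by rw [ht]; decide)]

-- main invariant: A's skip-free loop from any state, versus B's reversed-pass result
theorem pvCore (ls : List String) :
    ∀ blocks cur : List String,
      (let st := ls.foldl pvStepA' (blocks, cur)
       if st.2 ≠ [] then st.1 ++ [PySem.Str.join "\n" st.2] else st.1) =
      blocks ++
        (if cur ≠ [] then
          [PySem.Str.join "\n" (cur ++ ls.takeWhile (fun l => !PySem.Str.isIn " --> " l))]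
         else []) ++ (pvF ls).1.reverse := by
  induction ls with
  | nil =>
    intro blocks cur
    by_cases hc : cur = [] <;> simp [pvF, hc]
  | cons l ls ih =>
    intro blocks cur
    simp only [List.foldl_cons]
    rw [List.takeWhile_cons]
    cases ht : PySem.Str.isIn " --> " l
    · -- text line
      rw [pvF_fst_text l ls ht]
      simp only [Bool.not_false, if_pos]
      by_cases hc : cur = []
      · subst hc
        rw [show pvStepA' (blocks, []) l = (blocks, []) by
          unfold pvStepA'; rw [if_neg (by rw [ht]; decide)]; simp]
        rw [ih blocks []]
        simp
      · rw [show pvStepA' (blocks, cur) l = (blocks, cur ++ [l]) by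
          unfold pvStepA'; rw [if_neg (by rw [ht]; decide)]; rw [if_pos hc]]
        rw [ih blocks (cur ++ [l])]
        have hne : cur ++ [l] ≠ [] := by simp
        rw [if_pos hne, if_pos hc]
        simp
    · -- timestamp line
      rw [pvF_fst_ts l ls ht]
      simp only [Bool.not_true, Bool.false_eq_true, if_false]
      rw [show pvStepA' (blocks, cur) l
            = ((if cur ≠ [] then blocks ++ [PySem.Str.join "\n" cur] else blocks), [l]) by
        unfold pvStepA'; rw [if_pos ht]]
      by_cases hc : cur = []
      · subst hc
        simp only [ne_eq, not_true_eq_false, if_neg, not_false_eq_true]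
        rw [ih blocks [l]]
        simp
      · rw [if_pos hc, if_pos hc]
        rw [ih (blocks ++ [PySem.Str.join "\n" cur]) [l]]
        simp

-- ===== VERDICT (by name: the statement is the Claim_ definition above) =====
theorem parse_vtt_content_py_spec : Claim_equal_parse_vtt_content_py := by
  intro content _
  unfold Spec_parse_vtt_content_py parse_vtt_content_py parse_vtt_content_py_alt
  dsimp only
  rw [pvFoldA_filter, pvF_eq]
  rw [pvCore _ [] []]
  simp
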